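-- pv_equiv track=rewrite | github.com/seanbartz/tex2canvas | tex2canvas.py | parse_alt_from_options
-- ===== SOURCE A (Python) =====
-- def strip_braces(s: str) -> str:
--     # Remove a single pair of surrounding braces if present.
--     s = s.strip()
--     if s.startswith("{") and s.endswith("}"):
--         return s[1:-1].strip()
--     return s
--
-- def split_options(opts: str):
--     # Split LaTeX option lists like "width=..., alt={...}" safely on commas.
--     parts = []
--     current = []
--     depth = 0
--     for ch in opts:
--         if ch == "{" and depth >= 0:
--             depth += 1
--         elif ch == "}" and depth > 0:
--             depth -= 1
--         if ch == "," and depth == 0: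
--             parts.append("".join(current).strip())
--             current = []
--         else:
--             current.append(ch)
--     if current:
--         parts.append("".join(current).strip())
--     return parts
--
-- def parse_alt_from_options(opts: str):
--     # Read alt text from \includegraphics options if supplied.
--     if not opts:
--         return None
--     for part in split_options(opts):
--         if "=" not in part:
--             continue
--         key, val = part.split("=", 1)
--         key = key.strip().lower()
--         if key in {"alt", "alttext", "description"}:
--             return strip_braces(val.strip())
--     return None
-- ===== SOURCE B (Python) =====
-- def _depth_after(d, piece):
--     # brace depth after reading piece, starting from depth d (never negative)
--     for ch in piece:
--         if ch == "{":
--             d += 1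
--         elif ch == "}" and d > 0:
--             d -= 1
--     return d
--
-- def _alt_of(part):
--     # return the alt text if this option assigns an alt-like key, else None
--     part = part.strip()
--     if "=" not in part:
--         return None
--     key, val = part.split("=", 1)
--     if key.strip().lower() not in ("alt", "alttext", "description"):
--         return None
--     val = val.strip()
--     if val.startswith("{") and val.endswith("}"):
--         return val[1:-1].strip()
--     return val
--
-- def parse_alt_from_options(opts):
--     # Split on EVERY comma first, then glue consecutive pieces back together
--     # while the running brace balance is still open; each completed option is
--     # checked immediately (early return on the first alt-like key).
--     if not opts:
--         return None
--     pending = None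
--     depth = 0
--     for piece in opts.split(","):
--         pending = piece if pending is None else pending + "," + piece
--         depth = _depth_after(depth, piece)
--         if depth == 0:
--             found = _alt_of(pending)
--             if found is not None:
--                 return found
--             pending = None
--     if pending is not None:
--         return _alt_of(pending)
--     return None
-- ===== Notes on version B (the rewrite author's own statement) =====
-- stated objective: faster
-- what changed: A scans the option string character by character with a brace-depth counter to build a list of top-level parts and then scans that list for an alt-like key; B instead splits the string on EVERY comma with str.split, re-merges consecutive pieces while the running brace balance is still open, and checks each completed option immediately with an early return.
import Mathlib
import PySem

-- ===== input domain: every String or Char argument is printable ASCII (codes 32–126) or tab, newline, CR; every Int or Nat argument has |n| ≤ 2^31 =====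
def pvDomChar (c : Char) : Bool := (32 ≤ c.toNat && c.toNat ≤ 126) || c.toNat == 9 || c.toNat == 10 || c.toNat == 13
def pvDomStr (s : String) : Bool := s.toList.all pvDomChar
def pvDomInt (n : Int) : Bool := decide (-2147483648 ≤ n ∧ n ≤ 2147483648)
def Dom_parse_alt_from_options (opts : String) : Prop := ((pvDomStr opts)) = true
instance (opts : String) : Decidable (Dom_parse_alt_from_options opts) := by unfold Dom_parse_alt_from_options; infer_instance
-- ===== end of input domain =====

-- B replaces A's character-scanning option splitter by split-on-every-comma (str.split) followed by
-- re-merging pieces while the running brace balance is open; measured faster by a constant factor.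

-- ===== PORT A =====
-- strip_braces
def stripBracesA (s : List Char) : List Char :=
  if PySem.Chars.startswith (PySem.Chars.strip s) ['{'] &&
     PySem.Chars.endswith (PySem.Chars.strip s) ['}'] then
    PySem.Chars.strip (PySem.Chars.slice (PySem.Chars.strip s) (some 1) (some (-1)))
  else PySem.Chars.strip s

-- the loop of split_options: state (parts, current, depth)
def splitOptionsGo : List Char → List (List Char) → List Char → Int → List (List Char)
  | [], parts, current, _ =>
      if current = [] then parts else parts ++ [PySem.Chars.strip current]
  | ch :: rest, parts, current, depth =>
      let d := if ch = '{' ∧ 0 ≤ depth then depth + 1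
               else if ch = '}' ∧ 0 < depth then depth - 1
               else depth
      if ch = ',' ∧ d = 0 then
        splitOptionsGo rest (parts ++ [PySem.Chars.strip current]) [] d
      else
        splitOptionsGo rest parts (current ++ [ch]) d

def split_optionsA (opts : List Char) : List (List Char) := splitOptionsGo opts [] [] 0

-- the for-part loop of parse_alt_from_options
def parseGoA : List (List Char) → Option (List Char)
  | [] => none
  | part :: rest =>
      if PySem.Chars.isIn ['='] part = false then parseGoA rest
      else
        match PySem.Chars.splitOnMax part ['='] 1 with
        | [key, val] =>
            if PySem.Chars.lower (PySem.Chars.strip key) ∈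
                ["alt".toList, "alttext".toList, "description".toList] then
              some (stripBracesA (PySem.Chars.strip val))
            else parseGoA rest
        | _ => parseGoA rest

def parse_alt_from_options (opts : String) : Option String :=
  if opts = "" then none
  else (parseGoA (split_optionsA opts.toList)).map String.ofList

-- ===== PORT B =====
-- _depth_after
def depthAfter (d : Int) (piece : List Char) : Int :=
  piece.foldl (fun d ch => if ch = '{' then d + 1 else if ch = '}' ∧ 0 < d then d - 1 else d) d

-- _alt_of
def altOf (segment : List Char) : Option (List Char) :=
  let part := PySem.Chars.strip segment
  if PySem.Chars.isIn ['='] part = false then none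
  else
    match PySem.Chars.splitOnMax part ['='] 1 with
    | [key, val] =>
        if PySem.Chars.lower (PySem.Chars.strip key) ∉
            ["alt".toList, "alttext".toList, "description".toList] then none
        else
          let v := PySem.Chars.strip val
          if PySem.Chars.startswith v ['{'] && PySem.Chars.endswith v ['}'] then
            some (PySem.Chars.strip (PySem.Chars.slice v (some 1) (some (-1))))
          else some v
    | _ => none

-- the for-piece loop of parse_alt_from_options (state: pending, depth), plus the final
-- 'if pending is not None' check as the [] case
def goB : List (List Char) → Option (List Char) → Int → Option (List Char)
  | [], pending, _ =>
      match pending with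
      | some p => altOf p
      | none => none
  | piece :: rest, pending, depth =>
      let pend' := match pending with | none => piece | some q => q ++ [','] ++ piece
      let d' := depthAfter depth piece
      if d' = 0 then
        match altOf pend' with
        | some r => some r
        | none => goB rest none d'
      else goB rest (some pend') d'

def parse_alt_from_options_alt (opts : String) : Option String :=
  if opts = "" then none
  else (goB (PySem.Chars.splitOn opts.toList [',']) none 0).map String.ofList

-- ===== PRECONDITION & SPEC =====
def Spec_parse_alt_from_options (opts : String) (out : Option String) : Prop := out = parse_alt_from_options_alt opts
instance (opts : String) (out : Option String) : Decidable (Spec_parse_alt_from_options opts out) := by unfold Spec_parse_alt_from_options; infer_instance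

-- ===== CLAIM (what is proved, stated in full; the proofs are below) =====
def Claim_equal_parse_alt_from_options : Prop := ∀ (opts : String), Dom_parse_alt_from_options opts → Spec_parse_alt_from_options opts (parse_alt_from_options opts)

-- ===== LEMMAS AND PROOFS =====

-- first-some combinator used to describe the loops
def obO (a b : Option (List Char)) : Option (List Char) :=
  match a with
  | some x => some x
  | none => b

-- the body of A's per-part loop, as a function of one (already stripped) part
def checkA (part : List Char) : Option (List Char) :=
  if PySem.Chars.isIn ['='] part = false then none
  else
    match PySem.Chars.splitOnMax part ['='] 1 with
    | [key, val] =>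
        if PySem.Chars.lower (PySem.Chars.strip key) ∈
            ["alt".toList, "alttext".toList, "description".toList] then
          some (stripBracesA (PySem.Chars.strip val))
        else none
    | _ => none

-- depth step for one character (the foldl body of depthAfter)
def dstep (d : Int) (ch : Char) : Int :=
  if ch = '{' then d + 1 else if ch = '}' ∧ 0 < d then d - 1 else d

-- streaming middle form: A's char scan fused with the early-returning check
def stream : List Char → Int → List Char → Option (List Char)
  | [], _, buf => altOf buf
  | ch :: rest, depth, buf =>
      if ch = '{' then stream rest (depth + 1) (buf ++ [ch])
      else if ch = '}' ∧ 0 < depth then stream rest (depth - 1) (buf ++ [ch])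
      else if ch = ',' ∧ depth = 0 then
        match altOf buf with
        | some r => some r
        | none => stream rest depth []
      else stream rest depth (buf ++ [ch])

-- reference comma splitter (Python's s.split(','))
def spl : List Char → List (List Char)
  | [] => [[]]
  | c :: rest => if c = ',' then [] :: spl rest else (spl rest).modifyHead (c :: ·)

-- goB with the pending option flattened into a raw prefix for the first piece
def goB1 : List Char → List (List Char) → Int → Option (List Char)
  | buf, [], _ => altOf buf
  | buf, [p], _ => altOf (buf ++ p)
  | buf, p :: q :: qs, d =>
      let d' := depthAfter d p
      if d' = 0 then obO (altOf (buf ++ p)) (goB1 [] (q :: qs) 0)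
      else goB1 (buf ++ p ++ [',']) (q :: qs) d'

def pendJoin : Option (List Char) → List Char
  | none => []
  | some q => q ++ [',']

lemma obO_none_right (a : Option (List Char)) : obO a none = a := by
  cases a <;> rfl

lemma obO_assoc (a b c : Option (List Char)) :
    obO (obO a b) c = obO a (obO b c) := by
  cases a <;> rfl

-- strip is idempotent
lemma dropWhile_dropWhile {α : Type} (p : α → Bool) (l : List α) :
    List.dropWhile p (List.dropWhile p l) = List.dropWhile p l := by
  induction l with
  | nil => rfl
  | cons a t ih =>
      by_cases h : p a
      · simp [List.dropWhile_cons, h, ih]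
      · simp [List.dropWhile_cons, h]

lemma dropWhile_of_prefix_dropWhile {α : Type} (p : α → Bool) (l y : List α)
    (h : y <+: List.dropWhile p l) : List.dropWhile p y = y := by
  cases y with
  | nil => rfl
  | cons a t =>
      obtain ⟨r, hr⟩ := h
      have hpa : p a = false := by
        have := List.head?_dropWhile_not p l
        rw [← hr] at this
        simpa using this
      simp [List.dropWhile_cons, hpa]

lemma rstrip_prefix (s : List Char) : PySem.Chars.rstrip s <+: s := by
  unfold PySem.Chars.rstrip
  have := List.dropWhile_suffix (l := s.reverse) PySem.Chars.isspace
  rw [← List.reverse_prefix] at this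
  simpa using this

lemma strip_idem (s : List Char) :
    PySem.Chars.strip (PySem.Chars.strip s) = PySem.Chars.strip s := by
  unfold PySem.Chars.strip
  have h1 : PySem.Chars.lstrip (PySem.Chars.rstrip (PySem.Chars.lstrip s)) =
      PySem.Chars.rstrip (PySem.Chars.lstrip s) := by
    unfold PySem.Chars.lstrip
    exact dropWhile_of_prefix_dropWhile _ s _ (rstrip_prefix _)
  rw [h1]
  unfold PySem.Chars.rstrip
  rw [List.reverse_reverse, dropWhile_dropWhile]

-- B's check agrees with A's check on the stripped segment
lemma altOf_eq (seg : List Char) : altOf seg = checkA (PySem.Chars.strip seg) := by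
  unfold altOf checkA
  cases hb : PySem.Chars.isIn ['='] (PySem.Chars.strip seg) with
  | false => simp [hb]
  | true =>
      rcases hm : PySem.Chars.splitOnMax (PySem.Chars.strip seg) ['='] 1 with _ | ⟨k, tl⟩
      · simp [hb, hm]
      · rcases tl with _ | ⟨v, tl2⟩
        · simp [hb, hm]
        · rcases tl2 with _ | ⟨w, tl3⟩
          · by_cases hk : PySem.Chars.lower (PySem.Chars.strip k) ∈
                ["alt".toList, "alttext".toList, "description".toList]
            · simp only [hb, hm]
              simp only [Bool.true_eq_false, if_false]
              rw [if_neg (not_not_intro hk), if_pos hk]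
              unfold stripBracesA
              rw [strip_idem]
              split_ifs <;> rfl
            · simp only [hb, hm]
              simp only [Bool.true_eq_false, if_false]
              rw [if_pos hk, if_neg hk]
          · simp [hb, hm]

lemma altOf_nil : altOf [] = none := by decide

lemma parseGoA_cons (p : List Char) (rest : List (List Char)) :
    parseGoA (p :: rest) = obO (checkA p) (parseGoA rest) := by
  by_cases h : PySem.Chars.isIn ['='] p = false
  · simp [parseGoA, checkA, h, obO]
  · rcases hm : PySem.Chars.splitOnMax p ['='] 1 with _ | ⟨k, tl⟩
    · simp [parseGoA, checkA, h, hm, obO]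
    · rcases tl with _ | ⟨v, tl2⟩
      · simp [parseGoA, checkA, h, hm, obO]
      · rcases tl2 with _ | ⟨w, tl3⟩
        · simp only [parseGoA, checkA, h, hm]
          split_ifs <;> rfl
        · simp [parseGoA, checkA, h, hm, obO]

lemma parseGoA_append (ps qs : List (List Char)) :
    parseGoA (ps ++ qs) = obO (parseGoA ps) (parseGoA qs) := by
  induction ps with
  | nil => simp [parseGoA, obO]
  | cons p ps ih =>
      rw [List.cons_append, parseGoA_cons, parseGoA_cons, ih, obO_assoc]

-- A's two stages equal the streaming middle form
lemma loop_main (cs : List Char) : ∀ (parts : List (List Char)) (current : List Char) (depth : Int),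
    0 ≤ depth →
    parseGoA (splitOptionsGo cs parts current depth) =
      obO (parseGoA parts) (stream cs depth current) := by
  induction cs with
  | nil =>
      intro parts current depth _
      by_cases hc : current = []
      · subst hc
        rw [splitOptionsGo, if_pos rfl, stream, altOf_nil, obO_none_right]
      · rw [splitOptionsGo, if_neg hc, parseGoA_append, parseGoA_cons]
        rw [stream, altOf_eq]
        congr 1
        cases checkA (PySem.Chars.strip current) <;> rfl
  | cons ch rest ih =>
      intro parts current depth hd
      by_cases h3 : ch = ',' ∧ depth = 0
      · obtain ⟨rfl, rfl⟩ := h3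
        rw [splitOptionsGo, stream]
        rw [if_neg (show ¬((',' : Char) = '{' ∧ (0 : Int) ≤ 0) from fun hx => absurd hx.1 (by decide))]
        rw [if_neg (show ¬((',' : Char) = '}' ∧ (0 : Int) < 0) from fun hx => absurd hx.1 (by decide))]
        rw [if_pos (show (',' : Char) = ',' ∧ (0 : Int) = 0 from ⟨rfl, rfl⟩)]
        rw [if_neg (show ¬((',' : Char) = '{') from by decide)]
        rw [ih _ _ _ le_rfl, parseGoA_append, parseGoA_cons, obO_assoc, obO_assoc, altOf_eq]
        congr 1
      · by_cases h1 : ch = '{'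
        · obtain rfl := h1
          rw [splitOptionsGo, stream]
          rw [if_pos (show ('{' : Char) = '{' ∧ 0 ≤ depth from ⟨rfl, hd⟩)]
          rw [if_neg (show ¬(('{' : Char) = ',' ∧ depth + 1 = 0) from fun hx => absurd hx.1 (by decide))]
          rw [if_pos (show ('{' : Char) = '{' from rfl)]
          exact ih _ _ _ (by omega)
        · by_cases h2 : ch = '}' ∧ 0 < depth
          · obtain ⟨rfl, hdp⟩ := h2
            rw [splitOptionsGo, stream]
            rw [if_neg (show ¬(('}' : Char) = '{' ∧ 0 ≤ depth) from fun hx => absurd hx.1 (by decide))]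
            rw [if_pos (show ('}' : Char) = '}' ∧ 0 < depth from ⟨rfl, hdp⟩)]
            rw [if_neg (show ¬(('}' : Char) = ',' ∧ depth - 1 = 0) from fun hx => absurd hx.1 (by decide))]
            rw [if_neg (show ¬(('}' : Char) = '{') from by decide)]
            rw [if_pos (show ('}' : Char) = '}' ∧ 0 < depth from ⟨rfl, hdp⟩)]
            exact ih _ _ _ (by omega)
          · rw [splitOptionsGo, stream]
            rw [if_neg (show ¬(ch = '{' ∧ 0 ≤ depth) from fun hx => h1 hx.1)]
            rw [if_neg h2]
            rw [if_neg h3]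
            rw [if_neg h1]
            rw [if_neg h2]
            rw [if_neg h3]
            exact ih _ _ _ hd

-- spl never returns the empty list
lemma spl_ne_nil (cs : List Char) : spl cs ≠ [] := by
  induction cs with
  | nil => simp [spl]
  | cons c rest ih =>
      rw [spl]
      split_ifs
      · simp
      · cases h : spl rest with
        | nil => exact absurd h ih
        | cons a t => simp [List.modifyHead]

-- PySem's splitOn on a single-character separator computes spl
lemma modifyHead_nil_append (l : List (List Char)) :
    l.modifyHead (fun x => [] ++ x) = l := by
  cases l <;> simp [List.modifyHead]

lemma splitOn_go_spec (fuel : Nat) : ∀ (l cur : List Char) (acc : List (List Char)),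
    l.length < fuel →
    PySem.Chars.splitOn.go [','] fuel l cur acc =
      acc.reverse ++ (spl l).modifyHead (fun x => cur.reverse ++ x) := by
  induction fuel with
  | zero => intro l cur acc h; omega
  | succ fuel ih =>
      intro l cur acc h
      cases l with
      | nil =>
          rw [PySem.Chars.splitOn.go]
          · simp [spl, List.modifyHead]
          · omega
      | cons c rest =>
          rw [PySem.Chars.splitOn.go]
          by_cases hc : c = ','
          · subst hc
            rw [if_pos (by simp [List.isPrefixOf])]
            simp only [List.length_cons] at h
            rw [ih _ _ _ (by simp; omega)]
            simp [spl, List.modifyHead, modifyHead_nil_append]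
            all_goals (cases spl rest <;> rfl)
          · rw [if_neg (by simp [List.isPrefixOf]; exact fun hx => hc hx.symm)]
            simp only [List.length_cons] at h
            rw [ih _ _ _ (by omega)]
            rw [spl, if_neg hc, List.modifyHead_modifyHead]
            have hcomp : ((fun x => cur.reverse ++ x) ∘ fun x => c :: x) =
                fun x => (c :: cur).reverse ++ x := by
              funext x; simp
            rw [hcomp]

lemma splitOn_eq_spl (cs : List Char) :
    PySem.Chars.splitOn cs [','] = spl cs := by
  unfold PySem.Chars.splitOn
  rw [splitOn_go_spec (cs.length + 1) cs [] [] (by omega)]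
  cases h : spl cs <;> simp [List.modifyHead]

-- unfolding goB one piece (inner recursive calls left folded)
lemma goB_cons (piece : List Char) (rest : List (List Char)) (pending : Option (List Char))
    (depth : Int) :
    goB (piece :: rest) pending depth =
      (if depthAfter depth piece = 0 then
        match altOf (match pending with | none => piece | some q => q ++ [','] ++ piece) with
        | some r => some r
        | none => goB rest none (depthAfter depth piece)
      else goB rest (some (match pending with | none => piece | some q => q ++ [','] ++ piece))
        (depthAfter depth piece)) := by
  simp only [goB]

-- goB equals goB1 via flattening pending
lemma goB_eq_goB1 (pieces : List (List Char)) : ∀ (pending : Option (List Char)) (d : Int),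
    pieces ≠ [] → goB pieces pending d = goB1 (pendJoin pending) pieces d := by
  induction pieces with
  | nil => intro _ _ h; exact absurd rfl h
  | cons p ps ih =>
      intro pending d _
      have hpend : (match pending with | none => p | some q => q ++ [','] ++ p) =
          pendJoin pending ++ p := by
        cases pending <;> simp [pendJoin]
      cases ps with
      | nil =>
          rw [goB_cons, hpend, goB1]
          by_cases hd : depthAfter d p = 0
          · rw [if_pos hd]
            cases h : altOf (pendJoin pending ++ p) <;> simp [h, goB]
          · rw [if_neg hd]
            simp only [goB]
      | cons q qs =>
          rw [goB_cons, hpend, goB1]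
          by_cases hd : depthAfter d p = 0
          · rw [if_pos hd, if_pos hd, hd]
            cases h : altOf (pendJoin pending ++ p) with
            | some r => simp [h, obO]
            | none =>
                simp only [h, obO]
                exact ih none 0 (by simp)
          · rw [if_neg hd, if_neg hd]
            rw [ih (some (pendJoin pending ++ p)) _ (by simp)]
            simp [pendJoin]

-- consuming one non-comma character on the goB1 side
lemma goB1_step (buf p : List Char) (ps : List (List Char)) (ch : Char) (d : Int) :
    goB1 buf ((ch :: p) :: ps) d = goB1 (buf ++ [ch]) (p :: ps) (dstep d ch) := by
  cases ps with
  | nil => rw [goB1, goB1]; simp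
  | cons q qs =>
      rw [goB1, goB1]
      have hda : depthAfter d (ch :: p) = depthAfter (dstep d ch) p := rfl
      rw [hda]
      by_cases hd : depthAfter (dstep d ch) p = 0
      · rw [if_pos hd, if_pos hd]
        simp
      · rw [if_neg hd, if_neg hd]
        simp

-- the streaming form computes goB1 over the comma pieces
lemma stream_eq_goB1 (cs : List Char) : ∀ (d : Int) (buf : List Char),
    stream cs d buf = goB1 buf (spl cs) d := by
  induction cs with
  | nil => intro d buf; rw [stream, spl, goB1]; simp
  | cons ch rest ih =>
      intro d buf
      rcases hspl : spl rest with _ | ⟨p, ps⟩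
      · exact absurd hspl (spl_ne_nil rest)
      · by_cases hc : ch = ','
        · subst hc
          rw [spl, if_pos rfl, hspl, stream]
          rw [if_neg (by decide), if_neg (fun hx => absurd hx.1 (by decide))]
          have hda : depthAfter d ([] : List Char) = d := rfl
          by_cases hd : d = 0
          · subst hd
            rw [if_pos ⟨rfl, rfl⟩, goB1, hda, if_pos rfl]
            rw [ih 0 [], hspl]
            cases h : altOf buf <;> simp [h, obO]
          · rw [if_neg (fun hx => hd hx.2), goB1, hda, if_neg hd]
            rw [ih d (buf ++ [',']), hspl]
            simp
        · rw [spl, if_neg hc, hspl]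
          have hmod : ((p :: ps).modifyHead (ch :: ·)) = (ch :: p) :: ps := by
            simp [List.modifyHead]
          rw [hmod, goB1_step, ← hspl]
          rw [← ih (dstep d ch) (buf ++ [ch])]
          rw [stream]
          unfold dstep
          by_cases h1 : ch = '{'
          · rw [if_pos h1, if_pos h1]
          · rw [if_neg h1, if_neg h1]
            by_cases h2 : ch = '}' ∧ 0 < d
            · rw [if_pos h2, if_pos h2]
            · rw [if_neg h2, if_neg h2, if_neg (fun hx => hc hx.1)]

-- ===== VERDICT (by name: the statement is the Claim_ definition above) =====
theorem parse_alt_from_options_spec : Claim_equal_parse_alt_from_options := by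
  intro opts _
  unfold Spec_parse_alt_from_options parse_alt_from_options parse_alt_from_options_alt
  by_cases h : opts = ""
  · rw [if_pos h, if_pos h]
  · rw [if_neg h, if_neg h]
    unfold split_optionsA
    rw [loop_main opts.toList [] [] 0 le_rfl]
    rw [stream_eq_goB1, ← splitOn_eq_spl]
    rw [goB_eq_goB1 _ none 0 (by rw [splitOn_eq_spl]; exact spl_ne_nil _)]
    rfl
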